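-- pv_equiv track=rewrite | github.com/RuBisCO28/coding | hackerrank/components_in_a_graph.py | componentsInGraph
-- ===== SOURCE A (Python) =====
-- def generate_connected_groups(list_of_connected_nodes):
--   node_connections = {}
--   for connected_nodes in list_of_connected_nodes:
--     node_A, node_B = connected_nodes
--     if node_A not in node_connections:
--         node_connections[node_A] = {node_A}
--     if node_B not in node_connections:
--         node_connections[node_B] = {node_B}
--   for connected_nodes in list_of_connected_nodes:
--     node_A, node_B = connected_nodes
--     node_connections[node_A].add(node_B)
--     node_connections[node_B].add(node_A)
--
--   connected_groups_list = []
--   visited = set()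
--   for node in node_connections:
--     if node not in visited:
--       visited.add(node)
--       full_group = node_connections[node]
--       queue = [node_connections[node]]
--       while queue:
--         current_set = queue.pop()
--         for node in current_set:
--           if node not in visited:
--             visited.add(node)
--             full_group.add(node)
--             queue.append(node_connections[node])
--
--       connected_groups_list.append(full_group)
--
--   return connected_groups_list
--
-- def componentsInGraph(gb):
--   connected_groups = generate_connected_groups(gb)
--   connected_groups.sort(key=len)
--   i = 0
--   min = len(connected_groups[i])
--   while min == 1:
--     i += 1
--     min = len(connected_groups[i])
--   max = len(connected_groups[-1])
--
--   return (min, max)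
-- ===== SOURCE B (Python) =====
-- def componentsInGraph(gb):
--   # merge-based components: fold edges into a list of disjoint node-sets
--   comps = []
--   for a, b in gb:
--     merged = {a, b}
--     rest = []
--     for c in comps:
--       if merged & c:
--         merged |= c
--       else:
--         rest.append(c)
--     rest.append(merged)
--     comps = rest
--   sizes = [len(c) for c in comps]
--   return (min(s for s in sizes if s > 1), max(sizes))
-- ===== Notes on version B (the rewrite author's own statement) =====
-- stated objective: simpler
-- what changed: Replaces the adjacency-dict + BFS flood fill with a single fold over the edges that maintains a list of disjoint node-sets, merging the sets that meet {a,b} per edge, then reads min(size>1)/max(size) directly off the sizes instead of sorting the groups and scanning past the 1s.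
import Mathlib
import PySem

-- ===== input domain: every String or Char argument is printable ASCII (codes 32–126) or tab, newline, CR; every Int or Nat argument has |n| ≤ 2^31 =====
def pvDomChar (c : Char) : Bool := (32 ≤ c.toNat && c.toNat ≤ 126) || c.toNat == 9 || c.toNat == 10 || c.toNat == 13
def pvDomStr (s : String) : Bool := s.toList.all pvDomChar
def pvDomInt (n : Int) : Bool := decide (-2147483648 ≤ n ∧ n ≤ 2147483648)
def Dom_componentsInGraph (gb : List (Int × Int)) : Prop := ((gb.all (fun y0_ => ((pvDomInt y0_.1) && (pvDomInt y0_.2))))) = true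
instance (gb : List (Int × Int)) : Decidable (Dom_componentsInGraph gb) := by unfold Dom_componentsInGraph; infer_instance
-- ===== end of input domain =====

-- B replaces A's adjacency-dict + BFS flood fill by a single fold that merges overlapping
-- node-sets per edge (objective: simpler/alternative; equal return values on Pre_).
-- Neither program observably mutates its argument; the equivalence is about the return value.

-- ===== PORT A =====
-- phase 1: "if node not in node_connections: node_connections[node] = {node}" for both endpoints
def pvAdjInit (gb : List (Int × Int)) : PySem.Dict Int (PySem.Set Int) :=
  gb.foldl (fun d e =>
    let d := if d.contains e.1 then d else d.insert e.1 (PySem.Set.ofList [e.1])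
    if d.contains e.2 then d else d.insert e.2 (PySem.Set.ofList [e.2])) PySem.Dict.empty

-- phase 2: "node_connections[node_A].add(node_B); node_connections[node_B].add(node_A)"
-- (Dict.modify with default []: the keys are always present after phase 1, so the default is never used)
def pvAdjFill (gb : List (Int × Int)) (d0 : PySem.Dict Int (PySem.Set Int)) :
    PySem.Dict Int (PySem.Set Int) :=
  gb.foldl (fun d e =>
    let d := d.modify e.1 [] (fun s => PySem.Set.add s e.2)
    d.modify e.2 [] (fun s => PySem.Set.add s e.1)) d0

-- "for node in current_set: if node not in visited: visited.add; full_group.add; queue.append(adj[node])"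
-- The queue is kept most-recently-appended FIRST, so Python's queue.pop() is the head;
-- queue entries are the adjacency sets read from the dict (those sets are not mutated again
-- while they sit in the queue, so the snapshot is exact).
def pvBfsInner (d : PySem.Dict Int (PySem.Set Int)) (cur : List Int)
    (st : PySem.Set Int × PySem.Set Int × List (List Int)) :
    PySem.Set Int × PySem.Set Int × List (List Int) :=
  cur.foldl (fun st u =>
    if PySem.Set.contains st.1 u then st
    else (PySem.Set.add st.1 u, PySem.Set.add st.2.1 u, (d.getD u []) :: st.2.2)) st

-- "while queue: current_set = queue.pop(); …"; the fuel only makes the loop total in Lean,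
-- it is always sufficient (each iteration pops one set; at most one set per node is ever appended)
def pvBfsLoop (d : PySem.Dict Int (PySem.Set Int)) :
    Nat → PySem.Set Int → PySem.Set Int → List (List Int) → PySem.Set Int × PySem.Set Int
  | 0, v, f, _ => (v, f)
  | _ + 1, v, f, [] => (v, f)
  | fuel + 1, v, f, s :: q =>
      let st := pvBfsInner d s (v, f, q)
      pvBfsLoop d fuel st.1 st.2.1 st.2.2

-- one iteration of "for node in node_connections: if node not in visited: …"
-- full_group aliases node_connections[node] in Python; its in-place .add calls are modelled by
-- threading the set through the loop (no other live reference to that set is read afterwards)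
def pvOuterStep (d : PySem.Dict Int (PySem.Set Int))
    (st : PySem.Set Int × List (PySem.Set Int)) (node : Int) :
    PySem.Set Int × List (PySem.Set Int) :=
  if PySem.Set.contains st.1 node then st
  else
    let adjn := d.getD node []
    let p := pvBfsLoop d (d.keys.length + 1) (PySem.Set.add st.1 node) adjn [adjn]
    (p.1, st.2 ++ [p.2])

-- generate_connected_groups
def pvGroups (gb : List (Int × Int)) : List (PySem.Set Int) :=
  let d := pvAdjFill gb (pvAdjInit gb)
  (d.keys.foldl (pvOuterStep d) (PySem.Set.empty, [])).2

-- "i = 0; min = len(g[i]); while min == 1: i += 1; min = len(g[i])" on the sorted list;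
-- none = the IndexError A raises when the scan runs off the end (excluded by Pre_)
def pvScanMin : List (PySem.Set Int) → Option Int
  | [] => none
  | g :: t => if PySem.Set.len g = 1 then pvScanMin t else some (PySem.Set.len g)

def componentsInGraph (gb : List (Int × Int)) : Int × Int :=
  let groups := pvGroups gb
  let gs := PySem.List.sorted groups (fun g => PySem.Set.len g) false
  -- .getD 0 stands for the IndexError on empty/all-singleton inputs, which Pre_ excludes
  ((pvScanMin gs).getD 0, ((gs.getLast?).map PySem.Set.len).getD 0)

-- ===== PORT B =====
-- "for c in comps: if merged & c: merged |= c else: rest.append(c)"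
def pvMergeStep (st : PySem.Set Int × List (PySem.Set Int)) (c : PySem.Set Int) :
    PySem.Set Int × List (PySem.Set Int) :=
  if PySem.Set.inter st.1 c ≠ [] then (PySem.Set.union st.1 c, st.2)
  else (st.1, st.2 ++ [c])

-- fold one edge into the list of disjoint node-sets: merged = {a, b} ∪ (sets meeting it)
def pvMergeEdge (comps : List (PySem.Set Int)) (e : Int × Int) : List (PySem.Set Int) :=
  let st := comps.foldl pvMergeStep (PySem.Set.ofList [e.1, e.2], [])
  st.2 ++ [st.1]

def componentsInGraph_alt (gb : List (Int × Int)) : Int × Int :=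
  let comps := gb.foldl pvMergeEdge []
  let sizes := comps.map PySem.Set.len
  -- .getD 0 stands for the ValueError of min() on an empty generator, which Pre_ excludes
  ((PySem.List.min? (sizes.filter (fun s => decide (1 < s))) (fun s => s)).getD 0,
   (PySem.List.max? sizes (fun s => s)).getD 0)

-- ===== PRECONDITION & SPEC =====
-- A raises (IndexError) exactly on gb = [] and on inputs whose edges are all self-loops
-- (every component then has size 1); B raises (ValueError from min()) on the same inputs;
-- Pre_ excludes exactly those.
def Pre_componentsInGraph (gb : List (Int × Int)) : Prop :=
  gb ≠ [] ∧ ∃ e ∈ gb, e.1 ≠ e.2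
instance (gb : List (Int × Int)) : Decidable (Pre_componentsInGraph gb) := by
  unfold Pre_componentsInGraph; infer_instance

def pvWitness_componentsInGraph : (List (Int × Int)) := [(1, 2), (2, 3), (5, 5), (7, 8)]

def Spec_componentsInGraph (gb : List (Int × Int)) (out : Int × Int) : Prop := out = componentsInGraph_alt gb
instance (gb : List (Int × Int)) (out : Int × Int) : Decidable (Spec_componentsInGraph gb out) := by unfold Spec_componentsInGraph; infer_instance

-- ===== CLAIM (what is proved, stated in full; the proofs are below) =====
def Claim_equal_componentsInGraph : Prop := ∀ (gb : List (Int × Int)), Dom_componentsInGraph gb → Pre_componentsInGraph gb → Spec_componentsInGraph gb (componentsInGraph gb)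

-- ===== LEMMAS AND PROOFS =====

-- x–y is an edge of E (in either direction)
def pvStep (E : List (Int × Int)) (x y : Int) : Prop := (x, y) ∈ E ∨ (y, x) ∈ E

-- connectivity: reflexive-transitive closure of pvStep
def pvReach (E : List (Int × Int)) : Int → Int → Prop := Relation.ReflTransGen (pvStep E)

-- all edge endpoints, in order of appearance (with duplicates)
def pvNodes (E : List (Int × Int)) : List Int := E.flatMap (fun e => [e.1, e.2])

theorem pvStep_symm (E : List (Int × Int)) : Symmetric (pvStep E) := by
  intro x y h; cases h with
  | inl h => exact Or.inr h
  | inr h => exact Or.inl h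

theorem pvReach_symm (E : List (Int × Int)) : Symmetric (pvReach E) :=
  Relation.ReflTransGen.symmetric (pvStep_symm E)

theorem pvStep_mem_left {E : List (Int × Int)} {x y : Int} (h : pvStep E x y) : x ∈ pvNodes E := by
  cases h with
  | inl h => exact List.mem_flatMap.2 ⟨_, h, by simp⟩
  | inr h => exact List.mem_flatMap.2 ⟨_, h, by simp⟩

theorem pvStep_mem_right {E : List (Int × Int)} {x y : Int} (h : pvStep E x y) : y ∈ pvNodes E :=
  pvStep_mem_left (pvStep_symm E h)

theorem pvReach_mem_right {E : List (Int × Int)} {v u : Int} (h : pvReach E v u) :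
    v = u ∨ u ∈ pvNodes E := by
  induction h with
  | refl => exact Or.inl rfl
  | tail _ hstep _ => exact Or.inr (pvStep_mem_right hstep)

-- the same-class characterisation: reachability classes of reachable points coincide
theorem pvReach_class_eq {E : List (Int × Int)} {v w : Int} (h : pvReach E v w) :
    ∀ u, pvReach E v u ↔ pvReach E w u := by
  intro u
  constructor
  · intro hu; exact Relation.ReflTransGen.trans (pvReach_symm E h) hu
  · intro hu; exact Relation.ReflTransGen.trans h hu

-- gs is the list of connected components of E (each a duplicate-free class, covering, disjoint)
def pvIsComps (E : List (Int × Int)) (gs : List (List Int)) : Prop :=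
  (∀ g ∈ gs, g.Nodup ∧ ∃ v, v ∈ pvNodes E ∧ ∀ u, (u ∈ g ↔ pvReach E v u)) ∧
  (∀ v ∈ pvNodes E, ∃ g ∈ gs, v ∈ g) ∧
  gs.Pairwise (fun g h => ∀ u, u ∈ g → u ∉ h)

theorem pvPairwise_imp_mem {α : Type} {R S : α → α → Prop} :
    ∀ {l : List α}, (∀ a b, a ∈ l → b ∈ l → R a b → S a b) → l.Pairwise R → l.Pairwise S := by
  intro l
  induction l with
  | nil => intro _ _; exact List.Pairwise.nil
  | cons x t ih =>
      intro h hp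
      rcases List.pairwise_cons.1 hp with ⟨hx, ht⟩
      exact List.pairwise_cons.2
        ⟨fun b hb => h x b (by simp) (by simp [hb]) (hx b hb),
         ih (fun a b ha hb => h a b (by simp [ha]) (by simp [hb])) ht⟩

-- any two component lists have the same multiset of sizes
theorem pvIsComps_len_perm {E : List (Int × Int)} {gs1 gs2 : List (List Int)}
    (h1 : pvIsComps E gs1) (h2 : pvIsComps E gs2) :
    (gs1.map List.length).Perm (gs2.map List.length) := by
  have hrep : ∀ {gs : List (List Int)}, pvIsComps E gs → ∀ g ∈ gs,
      ∃ v, v ∈ g ∧ v ∈ pvNodes E ∧ (∀ u, u ∈ g ↔ pvReach E v u) := by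
    intro gs hc g hg
    rcases hc.1 g hg with ⟨_, v, hv, hiff⟩
    exact ⟨v, (hiff v).2 Relation.ReflTransGen.refl, hv, hiff⟩
  have hnd : ∀ {gs : List (List Int)}, pvIsComps E gs → (gs.map List.toFinset).Nodup := by
    intro gs hc
    have himp := pvPairwise_imp_mem
      (R := fun g h : List Int => ∀ u, u ∈ g → u ∉ h)
      (S := fun g h : List Int => g.toFinset ≠ h.toFinset)
      (fun g h hg _ hdisj heq => by
        rcases hrep hc g hg with ⟨v, hv, _, _⟩
        exact hdisj v hv (List.mem_toFinset.1 (heq ▸ List.mem_toFinset.2 hv)))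
      hc.2.2
    exact List.pairwise_map.2 himp
  have hsub : ∀ {gs gs' : List (List Int)}, pvIsComps E gs → pvIsComps E gs' →
      ∀ F ∈ gs.map List.toFinset, F ∈ gs'.map List.toFinset := by
    intro gs gs' hc hc' F hF
    rcases List.mem_map.1 hF with ⟨g, hg, rfl⟩
    rcases hrep hc g hg with ⟨v, hvg, hvN, hiff⟩
    rcases hc'.2.1 v hvN with ⟨h, hh, hvh⟩
    rcases hrep hc' h hh with ⟨w, hwh, hwN, hiff'⟩
    have hwv : pvReach E w v := (hiff' v).1 hvh
    refine List.mem_map.2 ⟨h, hh, ?_⟩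
    apply Finset.ext
    intro u
    simp only [List.mem_toFinset]
    rw [hiff' u, hiff u]
    exact pvReach_class_eq hwv u
  have hperm : (gs1.map List.toFinset).Perm (gs2.map List.toFinset) :=
    (List.perm_ext_iff_of_nodup (hnd h1) (hnd h2)).2
      (fun F => ⟨fun h => hsub h1 h2 F h, fun h => hsub h2 h1 F h⟩)
  have hlen : ∀ {gs : List (List Int)}, pvIsComps E gs →
      gs.map List.length = (gs.map List.toFinset).map Finset.card := by
    intro gs hc
    rw [List.map_map]
    apply List.map_congr_left
    intro g hg
    exact (List.toFinset_card_of_nodup (hc.1 g hg).1).symm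
  rw [hlen h1, hlen h2]
  exact hperm.map Finset.card

-- `pvNodes` distributes over appending one edge
theorem pvNodes_append (P : List (Int × Int)) (a b : Int) :
    pvNodes (P ++ [(a, b)]) = pvNodes P ++ [a, b] := by
  simp [pvNodes]

-- how reachability grows when one edge is appended
theorem pvReach_append (P : List (Int × Int)) (a b u v : Int) :
    pvReach (P ++ [(a, b)]) u v ↔
      pvReach P u v ∨ (pvReach P u a ∧ pvReach P b v) ∨ (pvReach P u b ∧ pvReach P a v) := by
  constructor
  · intro h
    induction h with
    | refl => exact Or.inl Relation.ReflTransGen.refl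
    | @tail x y hux hxy ih =>
        have hxy' : pvStep P x y ∨ (x = a ∧ y = b) ∨ (x = b ∧ y = a) := by
          rcases hxy with h | h
          · rcases List.mem_append.1 h with h | h
            · exact Or.inl (Or.inl h)
            · simp only [List.mem_singleton, Prod.ext_iff] at h
              exact Or.inr (Or.inl h)
          · rcases List.mem_append.1 h with h | h
            · exact Or.inl (Or.inr h)
            · simp only [List.mem_singleton, Prod.ext_iff] at h
              exact Or.inr (Or.inr ⟨h.2, h.1⟩)
        rcases hxy' with hold | ⟨hxa, hyb⟩ | ⟨hxb, hya⟩
        · rcases ih with h1 | ⟨h1, h2⟩ | ⟨h1, h2⟩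
          · exact Or.inl (h1.tail hold)
          · exact Or.inr (Or.inl ⟨h1, h2.tail hold⟩)
          · exact Or.inr (Or.inr ⟨h1, h2.tail hold⟩)
        · subst hxa; subst hyb
          rcases ih with h1 | ⟨h1, h2⟩ | ⟨h1, h2⟩
          · exact Or.inr (Or.inl ⟨h1, Relation.ReflTransGen.refl⟩)
          · exact Or.inr (Or.inl ⟨h1, Relation.ReflTransGen.refl⟩)
          · exact Or.inl h1
        · subst hxb; subst hya
          rcases ih with h1 | ⟨h1, h2⟩ | ⟨h1, h2⟩
          · exact Or.inr (Or.inr ⟨h1, Relation.ReflTransGen.refl⟩)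
          · exact Or.inl h1
          · exact Or.inr (Or.inr ⟨h1, Relation.ReflTransGen.refl⟩)
  · have hmono : ∀ x y, pvReach P x y → pvReach (P ++ [(a, b)]) x y := by
      intro x y h
      exact Relation.ReflTransGen.mono
        (fun x y h => by rcases h with h | h
                         · exact Or.inl (List.mem_append.2 (Or.inl h))
                         · exact Or.inr (List.mem_append.2 (Or.inl h))) h
    have hab : pvReach (P ++ [(a, b)]) a b :=
      Relation.ReflTransGen.single (Or.inl (List.mem_append.2 (Or.inr (by simp))))
    have hba : pvReach (P ++ [(a, b)]) b a :=
      Relation.ReflTransGen.single (Or.inr (List.mem_append.2 (Or.inr (by simp))))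
    intro h
    rcases h with h | ⟨h1, h2⟩ | ⟨h1, h2⟩
    · exact hmono _ _ h
    · exact ((hmono _ _ h1).trans hab).trans (hmono _ _ h2)
    · exact ((hmono _ _ h1).trans hba).trans (hmono _ _ h2)

-- characterisation of B's inner merge fold
theorem pvMergeFold_char (a b : Int) :
    ∀ (cs : List (List Int)) (m : List Int) (r : List (List Int)),
    m.Nodup → a ∈ m → b ∈ m →
    (∀ c ∈ cs, ∀ u ∈ c, u ∈ m → u = a ∨ u = b) →
    cs.Pairwise (fun g h => ∀ u, u ∈ g → u ∉ h) →
    (cs.foldl pvMergeStep (m, r)).1.Nodup ∧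
    (∀ u, u ∈ (cs.foldl pvMergeStep (m, r)).1 ↔
        u ∈ m ∨ ∃ c ∈ cs, (a ∈ c ∨ b ∈ c) ∧ u ∈ c) ∧
    (cs.foldl pvMergeStep (m, r)).2 =
        r ++ cs.filter (fun c => !(c.contains a || c.contains b)) := by
  intro cs
  induction cs with
  | nil =>
      intro m r hm _ _ _ _
      exact ⟨hm, by simp, by simp⟩
  | cons c cs ih =>
      intro m r hm ha hb H hp
      rcases List.pairwise_cons.1 hp with ⟨hc, hp'⟩
      have hcond : (PySem.Set.inter m c ≠ []) ↔ (a ∈ c ∨ b ∈ c) := by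
        constructor
        · intro hne
          rcases List.exists_mem_of_ne_nil _ hne with ⟨u, hu⟩
          rcases (PySem.Set.mem_inter m c u).1 hu with ⟨hum, huc⟩
          rcases H c (by simp) u huc hum with rfl | rfl
          · exact Or.inl huc
          · exact Or.inr huc
        · intro h he
          rcases h with h | h
          · have : a ∈ PySem.Set.inter m c := (PySem.Set.mem_inter m c a).2 ⟨ha, h⟩
            rw [he] at this; simp at this
          · have : b ∈ PySem.Set.inter m c := (PySem.Set.mem_inter m c b).2 ⟨hb, h⟩
            rw [he] at this; simp at this
      by_cases habc : a ∈ c ∨ b ∈ c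
      · have hstep : pvMergeStep (m, r) c = (PySem.Set.union m c, r) := by
          simp only [pvMergeStep]; rw [if_pos (hcond.2 habc)]
        have hm' : (PySem.Set.union m c).Nodup := PySem.Set.nodup_union _ _ hm
        have ha' : a ∈ PySem.Set.union m c := (PySem.Set.mem_union _ _ a).2 (Or.inl ha)
        have hb' : b ∈ PySem.Set.union m c := (PySem.Set.mem_union _ _ b).2 (Or.inl hb)
        have H' : ∀ c' ∈ cs, ∀ u ∈ c', u ∈ PySem.Set.union m c → u = a ∨ u = b := by
          intro c' hc' u hu hum
          rcases (PySem.Set.mem_union _ _ u).1 hum with h | h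
          · exact H c' (by simp [hc']) u hu h
          · exact absurd hu (hc c' hc' u h)
        rcases ih (PySem.Set.union m c) r hm' ha' hb' H' hp' with ⟨i1, i2, i3⟩
        have hfold : List.foldl pvMergeStep (m, r) (c :: cs) =
            List.foldl pvMergeStep (PySem.Set.union m c, r) cs := by
          rw [List.foldl_cons, hstep]
        rw [hfold]
        refine ⟨i1, ?_, ?_⟩
        · intro u; rw [i2 u]
          simp only [PySem.Set.mem_union]
          constructor
          · rintro ((h | h) | ⟨c', hc', hab', hu'⟩)
            · exact Or.inl h
            · exact Or.inr ⟨c, by simp, habc, h⟩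
            · exact Or.inr ⟨c', by simp [hc'], hab', hu'⟩
          · rintro (h | ⟨c0, hc0, hab0, hu0⟩)
            · exact Or.inl (Or.inl h)
            · rcases List.mem_cons.1 hc0 with rfl | hc0'
              · exact Or.inl (Or.inr hu0)
              · exact Or.inr ⟨c0, hc0', hab0, hu0⟩
        · rw [i3]
          have hfc : (!(c.contains a || c.contains b)) = false := by
            rcases habc with h | h <;> simp [h]
          rw [List.filter_cons, hfc]
          simp
      · have hnotne : ¬(PySem.Set.inter m c ≠ []) := fun h => habc (hcond.1 h)
        have hstep : pvMergeStep (m, r) c = (m, r ++ [c]) := by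
          simp only [pvMergeStep]; rw [if_neg hnotne]
        have hna : a ∉ c := fun h => habc (Or.inl h)
        have hnb : b ∉ c := fun h => habc (Or.inr h)
        rcases ih m (r ++ [c]) hm ha hb (fun c' h => H c' (by simp [h])) hp' with ⟨i1, i2, i3⟩
        have hfold : List.foldl pvMergeStep (m, r) (c :: cs) =
            List.foldl pvMergeStep (m, r ++ [c]) cs := by
          rw [List.foldl_cons, hstep]
        rw [hfold]
        refine ⟨i1, ?_, ?_⟩
        · intro u; rw [i2 u]
          constructor
          · rintro (h | ⟨c', hc', hab', hu'⟩)
            · exact Or.inl h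
            · exact Or.inr ⟨c', by simp [hc'], hab', hu'⟩
          · rintro (h | ⟨c0, hc0, hab0, hu0⟩)
            · exact Or.inl h
            · rcases List.mem_cons.1 hc0 with rfl | hc0'
              · exact absurd hab0 (by simp [hna, hnb])
              · exact Or.inr ⟨c0, hc0', hab0, hu0⟩
        · rw [i3]
          have hfc : (!(c.contains a || c.contains b)) = true := by
            simp [hna, hnb]
          rw [List.filter_cons, hfc]
          simp

-- B's per-edge step turns the components of P into the components of P ++ [e]
theorem pvMergeEdge_spec {P : List (Int × Int)} {comps : List (List Int)}
    (h : pvIsComps P comps) (e : Int × Int) :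
    pvIsComps (P ++ [e]) (pvMergeEdge comps e) := by
  obtain ⟨a, b⟩ := e
  obtain ⟨hg, hcov, hdisj⟩ := h
  have hsymm : Symmetric (fun g h : List Int => ∀ u, u ∈ g → u ∉ h) := by
    intro x y hxy u huy hux
    exact hxy u hux huy
  have hm0 : (PySem.Set.ofList [a, b]).Nodup := PySem.Set.nodup_ofList _
  have ha0 : a ∈ PySem.Set.ofList [a, b] := (PySem.Set.mem_ofList _ _).2 (by simp)
  have hb0 : b ∈ PySem.Set.ofList [a, b] := (PySem.Set.mem_ofList _ _).2 (by simp)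
  have H0 : ∀ c ∈ comps, ∀ u ∈ c, u ∈ PySem.Set.ofList [a, b] → u = a ∨ u = b := by
    intro c _ u _ hu
    have := (PySem.Set.mem_ofList _ _).1 hu
    simpa using this
  rcases pvMergeFold_char a b comps (PySem.Set.ofList [a, b]) [] hm0 ha0 hb0 H0 hdisj with
    ⟨hMnd, hMmem, hRdef⟩
  have hEdge : pvMergeEdge comps (a, b) =
      (comps.foldl pvMergeStep (PySem.Set.ofList [a, b], [])).2 ++
      [(comps.foldl pvMergeStep (PySem.Set.ofList [a, b], [])).1] := rfl
  rw [hEdge]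
  rw [hRdef, List.nil_append]
  set M := (comps.foldl pvMergeStep (PySem.Set.ofList [a, b], [])).1 with hMdefn
  have hmem0 : ∀ u, u ∈ PySem.Set.ofList [a, b] ↔ (u = a ∨ u = b) := by
    intro u; rw [PySem.Set.mem_ofList]; simp
  -- the reusable "a class member reaches u gives the RHS of M's membership" step
  have key : ∀ x u, (x = a ∨ x = b) → pvReach P x u →
      (u = a ∨ u = b) ∨ ∃ c ∈ comps, (a ∈ c ∨ b ∈ c) ∧ u ∈ c := by
    intro x u hx hxu
    by_cases hux : u = x
    · left; rcases hx with rfl | rfl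
      · exact Or.inl hux
      · exact Or.inr hux
    · have hxN : x ∈ pvNodes P := by
        rcases pvReach_mem_right (pvReach_symm P hxu) with h | h
        · exact absurd h hux
        · exact h
      rcases hcov x hxN with ⟨c, hcm, hxc⟩
      rcases hg c hcm with ⟨_, w, _, hiffc⟩
      have hwx := (hiffc x).1 hxc
      have hwu : pvReach P w u := hwx.trans hxu
      refine Or.inr ⟨c, hcm, ?_, (hiffc u).2 hwu⟩
      rcases hx with rfl | rfl
      · exact Or.inl hxc
      · exact Or.inr hxc
  refine ⟨?_, ?_, ?_⟩
  · -- every group is a class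
    intro g hgm
    rcases List.mem_append.1 hgm with hgR | hgM
    · have hgc : g ∈ comps := List.mem_of_mem_filter hgR
      have hfc := List.of_mem_filter hgR
      have hna : a ∉ g := by
        intro hmem; simp [hmem] at hfc
      have hnb : b ∉ g := by
        intro hmem; simp [hmem] at hfc
      rcases hg g hgc with ⟨hnd', v, hvN, hiff⟩
      refine ⟨hnd', v, by rw [pvNodes_append]; exact List.mem_append.2 (Or.inl hvN), ?_⟩
      intro u
      rw [hiff u]
      rw [pvReach_append P a b v u]
      constructor
      · exact fun h => Or.inl h
      · rintro (h | ⟨h1, h2⟩ | ⟨h1, h2⟩)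
        · exact h
        · exact absurd ((hiff a).2 h1) hna
        · exact absurd ((hiff b).2 h1) hnb
    · have hgM' : g = M := by simpa using hgM
      subst hgM'
      refine ⟨hMnd, a, by rw [pvNodes_append]; simp, ?_⟩
      intro u
      rw [hMmem u, hmem0 u]
      rw [pvReach_append P a b a u]
      constructor
      · rintro ((rfl | rfl) | ⟨c, hcmem, hab', hu'⟩)
        · exact Or.inl Relation.ReflTransGen.refl
        · exact Or.inr (Or.inl ⟨Relation.ReflTransGen.refl, Relation.ReflTransGen.refl⟩)
        · rcases hg c hcmem with ⟨_, w, _, hiffc⟩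
          rcases hab' with hac | hbc
          · have h1 := (hiffc a).1 hac
            have h2 := (hiffc u).1 hu'
            exact Or.inl ((pvReach_symm P h1).trans h2)
          · have h1 := (hiffc b).1 hbc
            have h2 := (hiffc u).1 hu'
            exact Or.inr (Or.inl ⟨Relation.ReflTransGen.refl, (pvReach_symm P h1).trans h2⟩)
      · rintro (h | ⟨h1, h2⟩ | ⟨h1, h2⟩)
        · exact key a u (Or.inl rfl) h
        · exact key b u (Or.inr rfl) h2
        · exact key a u (Or.inl rfl) h2
  · -- coverage
    intro v hv
    rw [pvNodes_append] at hv
    rcases List.mem_append.1 hv with hvP | hvab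
    · rcases hcov v hvP with ⟨c, hcm, hvc⟩
      by_cases hc' : a ∈ c ∨ b ∈ c
      · exact ⟨M, List.mem_append.2 (Or.inr (by simp)),
          (hMmem v).2 (Or.inr ⟨c, hcm, hc', hvc⟩)⟩
      · rw [not_or] at hc'
        refine ⟨c, List.mem_append.2 (Or.inl (List.mem_filter.2 ⟨hcm, ?_⟩)), hvc⟩
        simp [hc'.1, hc'.2]
    · refine ⟨M, List.mem_append.2 (Or.inr (by simp)), (hMmem v).2 (Or.inl ((hmem0 v).2 ?_))⟩
      simpa using hvab
  · -- pairwise disjoint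
    rw [List.pairwise_append]
    refine ⟨List.Pairwise.filter _ hdisj, by simp, ?_⟩
    intro g hgR M' hM' u hug huM'
    have hM'' : M' = M := by simpa using hM'
    subst hM''
    have hgc : g ∈ comps := List.mem_of_mem_filter hgR
    have hfc := List.of_mem_filter hgR
    have hna : a ∉ g := by intro hmem; simp [hmem] at hfc
    have hnb : b ∉ g := by intro hmem; simp [hmem] at hfc
    rcases (hMmem u).1 huM' with h0 | ⟨c, hcm, hab', huc⟩
    · rcases (hmem0 u).1 h0 with rfl | rfl
      · exact hna hug
      · exact hnb hug
    · have hcg : c ≠ g := by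
        rintro rfl
        rcases hab' with h | h
        · exact hna h
        · exact hnb h
      exact List.Pairwise.forall hsymm hdisj hcm hgc hcg u huc hug

theorem pvB_comps_spec (gb : List (Int × Int)) : pvIsComps gb (gb.foldl pvMergeEdge []) := by
  induction gb using List.reverseRecOn with
  | nil =>
      refine ⟨by simp, ?_, by simp⟩
      intro v hv; simp [pvNodes] at hv
  | append_singleton P e ih =>
      rw [List.foldl_append]
      exact pvMergeEdge_spec ih e

-- ——— A side ———

-- phase-1 invariant: every present key maps to its own singleton
theorem pvAdjInit_aux :
    ∀ (l : List (Int × Int)) (d : PySem.Dict Int (PySem.Set Int)),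
    d.keys.Nodup →
    (∀ v, d.getD v [] = if v ∈ d.keys then [v] else []) →
    (l.foldl (fun d e =>
        let d := if d.contains e.1 then d else d.insert e.1 (PySem.Set.ofList [e.1])
        if d.contains e.2 then d else d.insert e.2 (PySem.Set.ofList [e.2])) d).keys.Nodup ∧
    (∀ v, v ∈ (l.foldl (fun d e =>
        let d := if d.contains e.1 then d else d.insert e.1 (PySem.Set.ofList [e.1])
        if d.contains e.2 then d else d.insert e.2 (PySem.Set.ofList [e.2])) d).keys ↔
        v ∈ d.keys ∨ v ∈ pvNodes l) ∧
    (∀ v, (l.foldl (fun d e =>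
        let d := if d.contains e.1 then d else d.insert e.1 (PySem.Set.ofList [e.1])
        if d.contains e.2 then d else d.insert e.2 (PySem.Set.ofList [e.2])) d).getD v [] =
        if v ∈ (l.foldl (fun d e =>
        let d := if d.contains e.1 then d else d.insert e.1 (PySem.Set.ofList [e.1])
        if d.contains e.2 then d else d.insert e.2 (PySem.Set.ofList [e.2])) d).keys then [v] else []) := by
  intro l
  induction l with
  | nil => intro d h1 h2; exact ⟨h1, by intro v; simp [pvNodes], h2⟩
  | cons e t ih =>
      intro d h1 h2
      -- one step of the fold
      have hstep : ∀ (d : PySem.Dict Int (PySem.Set Int)) (x : Int),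
          d.keys.Nodup → (∀ v, d.getD v [] = if v ∈ d.keys then [v] else []) →
          (if d.contains x then d else d.insert x (PySem.Set.ofList [x])).keys.Nodup ∧
          (∀ v, v ∈ (if d.contains x then d else d.insert x (PySem.Set.ofList [x])).keys ↔
              v ∈ d.keys ∨ v = x) ∧
          (∀ v, (if d.contains x then d else d.insert x (PySem.Set.ofList [x])).getD v [] =
              if v ∈ (if d.contains x then d else d.insert x (PySem.Set.ofList [x])).keys
              then [v] else []) := by
        intro d x hnd hinv
        by_cases hc : d.contains x = true
        · have hx : x ∈ d.keys := (PySem.Dict.contains_iff_mem_keys d x).1 hc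
          simp only [hc, if_true]
          exact ⟨hnd, by intro v; constructor
                         · intro h; exact Or.inl h
                         · rintro (h | rfl); exact h; exact hx, hinv⟩
        · have hc' : d.contains x = false := by simpa using hc
          have hx : x ∉ d.keys := by
            intro h; exact hc ((PySem.Dict.contains_iff_mem_keys d x).2 h)
          have hkeys : (d.insert x (PySem.Set.ofList [x])).keys = d.keys ++ [x] :=
            PySem.Dict.keys_insert_of_not_contains d _ hc'
          simp only [hc', Bool.false_eq_true, if_false]
          refine ⟨?_, ?_, ?_⟩
          · rw [hkeys]; exact List.Nodup.append hnd (by simp) (by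
              intro a ha hb; simp at hb; subst hb; exact hx ha)
          · intro v; rw [hkeys]; simp
          · intro v
            by_cases hvx : v = x
            · subst hvx
              rw [PySem.Dict.getD_insert_self, hkeys]
              simp [PySem.Set.ofList]
            · rw [PySem.Dict.getD_insert_of_ne d _ _ hvx, hkeys, hinv v]
              simp [hvx]
      rcases hstep d e.1 h1 h2 with ⟨n1, m1, i1⟩
      rcases hstep _ e.2 n1 i1 with ⟨n2, m2, i2⟩
      rcases ih _ n2 i2 with ⟨n3, m3, i3⟩
      refine ⟨n3, ?_, i3⟩
      intro v
      have hgoal := m3 v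
      rw [m2 v, m1 v] at hgoal
      simp only [List.foldl_cons]
      exact hgoal.trans (by
        simp only [pvNodes, List.flatMap_cons, List.mem_append, List.mem_cons,
          List.not_mem_nil, or_false]
        tauto)

theorem pvAdjInit_keys_mem (gb : List (Int × Int)) (v : Int) :
    v ∈ (pvAdjInit gb).keys ↔ v ∈ pvNodes gb := by
  have h := pvAdjInit_aux gb PySem.Dict.empty PySem.Dict.nodup_keys_empty (by
    intro v; simp [PySem.Dict.empty, PySem.Dict.getD, PySem.Dict.get?, PySem.Dict.keys])
  rw [pvAdjInit, (h.2.1 v)]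
  simp [PySem.Dict.empty, PySem.Dict.keys]

theorem pvAdjInit_keys_nodup (gb : List (Int × Int)) : (pvAdjInit gb).keys.Nodup := by
  have h := pvAdjInit_aux gb PySem.Dict.empty PySem.Dict.nodup_keys_empty (by
    intro v; simp [PySem.Dict.empty, PySem.Dict.getD, PySem.Dict.get?, PySem.Dict.keys])
  exact h.1

theorem pvAdjInit_getD (gb : List (Int × Int)) (v : Int) :
    (pvAdjInit gb).getD v [] = if v ∈ pvNodes gb then [v] else [] := by
  have h := pvAdjInit_aux gb PySem.Dict.empty PySem.Dict.nodup_keys_empty (by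
    intro v; simp [PySem.Dict.empty, PySem.Dict.getD, PySem.Dict.get?, PySem.Dict.keys])
  have hk := pvAdjInit_keys_mem gb v
  rw [pvAdjInit] at hk ⊢
  rw [h.2.2 v]
  by_cases hv : v ∈ pvNodes gb
  · rw [if_pos (hk.2 hv), if_pos hv]
  · rw [if_neg (fun hmem => hv (hk.1 hmem)), if_neg hv]

theorem pvAdjFill_keys_mem (l : List (Int × Int)) (d : PySem.Dict Int (PySem.Set Int)) (k : Int) :
    k ∈ (pvAdjFill l d).keys ↔ k ∈ d.keys ∨ k ∈ pvNodes l := by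
  induction l generalizing d with
  | nil => simp [pvAdjFill, pvNodes]
  | cons e t ih =>
      have hstep : ∀ k' : Int,
          k' ∈ ((d.modify e.1 [] (fun s => PySem.Set.add s e.2)).modify e.2 []
              (fun s => PySem.Set.add s e.1)).keys ↔ k' = e.1 ∨ k' = e.2 ∨ k' ∈ d.keys := by
        intro k'
        rw [PySem.Dict.keys_modify, PySem.Dict.mem_keys_insert,
          PySem.Dict.keys_modify, PySem.Dict.mem_keys_insert]
        tauto
      have hred : pvAdjFill (e :: t) d = pvAdjFill t
          ((d.modify e.1 [] (fun s => PySem.Set.add s e.2)).modify e.2 []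
              (fun s => PySem.Set.add s e.1)) := rfl
      rw [hred, ih, hstep k]
      simp only [pvNodes, List.flatMap_cons, List.mem_append, List.mem_cons,
        List.not_mem_nil, or_false]
      tauto

theorem pvAdjFill_keys_nodup (l : List (Int × Int)) (d : PySem.Dict Int (PySem.Set Int))
    (h : d.keys.Nodup) : (pvAdjFill l d).keys.Nodup := by
  induction l generalizing d with
  | nil => exact h
  | cons e t ih =>
      have hred : pvAdjFill (e :: t) d = pvAdjFill t
          ((d.modify e.1 [] (fun s => PySem.Set.add s e.2)).modify e.2 []
              (fun s => PySem.Set.add s e.1)) := rfl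
      rw [hred]
      apply ih
      have h1 : (d.modify e.1 [] (fun s => PySem.Set.add s e.2)).keys.Nodup := by
        rw [PySem.Dict.keys_modify]; exact PySem.Dict.nodup_keys_insert _ _ _ h
      rw [PySem.Dict.keys_modify]
      exact PySem.Dict.nodup_keys_insert _ _ _ h1

theorem pvAdjFill_getD (gb : List (Int × Int)) :
    ∀ (l S : List (Int × Int)) (d : PySem.Dict Int (PySem.Set Int)),
    (∀ e ∈ l, e.1 ∈ pvNodes gb ∧ e.2 ∈ pvNodes gb) →
    (∀ v u, u ∈ d.getD v [] ↔ v ∈ pvNodes gb ∧ (u = v ∨ pvStep S v u)) →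
    (∀ v, (d.getD v []).Nodup) →
    (∀ v u, u ∈ (pvAdjFill l d).getD v [] ↔ v ∈ pvNodes gb ∧ (u = v ∨ pvStep (S ++ l) v u)) ∧
    (∀ v, ((pvAdjFill l d).getD v []).Nodup) := by
  intro l
  induction l with
  | nil =>
      intro S d _ hinv hnd
      exact ⟨by simpa using hinv, hnd⟩
  | cons e t ih =>
      intro S d hl hinv hnd
      have he : e.1 ∈ pvNodes gb ∧ e.2 ∈ pvNodes gb := hl e (by simp)
      have hred : pvAdjFill (e :: t) d = pvAdjFill t
          ((d.modify e.1 [] (fun s => PySem.Set.add s e.2)).modify e.2 []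
              (fun s => PySem.Set.add s e.1)) := rfl
      have hinv2 : ∀ v u, u ∈ ((d.modify e.1 [] (fun s => PySem.Set.add s e.2)).modify e.2 []
              (fun s => PySem.Set.add s e.1)).getD v [] ↔
          v ∈ pvNodes gb ∧ (u = v ∨ pvStep (S ++ [e]) v u) := by
        intro v u
        have hstepchar : pvStep (S ++ [e]) v u ↔
            pvStep S v u ∨ (v = e.1 ∧ u = e.2) ∨ (v = e.2 ∧ u = e.1) := by
          simp only [pvStep, List.mem_append, List.mem_singleton, Prod.ext_iff]
          tauto
        rw [PySem.Dict.getD_modify, PySem.Dict.getD_modify, PySem.Dict.getD_modify]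
        rcases he with ⟨he1, he2⟩
        split_ifs with h1 h2 h3 <;>
          simp only [PySem.Set.mem_add, hinv, hstepchar] <;>
          [subst h1; subst h1; subst h3; skip] <;>
          try subst h2
        · simp_all; tauto
        · simp_all; tauto
        · simp_all; tauto
        · tauto
      have hnd2 : ∀ v, (((d.modify e.1 [] (fun s => PySem.Set.add s e.2)).modify e.2 []
              (fun s => PySem.Set.add s e.1)).getD v []).Nodup := by
        intro v
        rw [PySem.Dict.getD_modify, PySem.Dict.getD_modify, PySem.Dict.getD_modify]
        split_ifs
        · exact PySem.Set.nodup_add _ _ (PySem.Set.nodup_add _ _ (hnd _))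
        · exact PySem.Set.nodup_add _ _ (hnd _)
        · exact PySem.Set.nodup_add _ _ (hnd _)
        · exact hnd _
      have hl' : ∀ e' ∈ t, e'.1 ∈ pvNodes gb ∧ e'.2 ∈ pvNodes gb :=
        fun e' h => hl e' (by simp [h])
      have := ih (S ++ [e]) _ hl' hinv2 hnd2
      rw [hred]
      rwa [List.append_assoc, List.singleton_append] at this

-- a duplicate-free list included in another duplicate-free list is no longer
theorem pvNodup_length_le {V K : List Int} (hV : V.Nodup) (hK : K.Nodup)
    (hsub : ∀ x ∈ V, x ∈ K) : V.length ≤ K.length := by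
  have h1 : V.toFinset.card = V.length := List.toFinset_card_of_nodup hV
  have h2 : K.toFinset.card = K.length := List.toFinset_card_of_nodup hK
  have : V.toFinset ⊆ K.toFinset := by
    intro x hx; simp only [List.mem_toFinset] at hx ⊢; exact hsub x hx
  have := Finset.card_le_card this
  omega

-- the inner BFS loop: membership bookkeeping of one popped set
theorem pvBfsInner_spec (d : PySem.Dict Int (PySem.Set Int)) :
    ∀ (cur : List Int) (V F : PySem.Set Int) (Q : List (List Int)),
    V.Nodup → F.Nodup →
    (pvBfsInner d cur (V, F, Q)).1.Nodup ∧
    (pvBfsInner d cur (V, F, Q)).2.1.Nodup ∧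
    (∀ u, u ∈ (pvBfsInner d cur (V, F, Q)).1 ↔ u ∈ V ∨ u ∈ cur) ∧
    (∀ u, u ∈ (pvBfsInner d cur (V, F, Q)).2.1 ↔ u ∈ F ∨ (u ∈ cur ∧ u ∉ V)) ∧
    (∀ S ∈ (pvBfsInner d cur (V, F, Q)).2.2, S ∈ Q ∨ ∃ w, w ∈ cur ∧ w ∉ V ∧ S = d.getD w []) ∧
    (∀ S ∈ Q, S ∈ (pvBfsInner d cur (V, F, Q)).2.2) ∧
    (∀ w ∈ cur, w ∉ V → d.getD w [] ∈ (pvBfsInner d cur (V, F, Q)).2.2) ∧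
    (pvBfsInner d cur (V, F, Q)).2.2.length + V.length ≤
        Q.length + (pvBfsInner d cur (V, F, Q)).1.length := by
  intro cur
  induction cur with
  | nil =>
      intro V F Q hV hF
      refine ⟨hV, hF, by simp [pvBfsInner], by simp [pvBfsInner], ?_, ?_, by simp, ?_⟩
      · intro S hS; exact Or.inl hS
      · intro S hS; exact hS
      · simp [pvBfsInner]
  | cons u t ih =>
      intro V F Q hV hF
      by_cases hu : u ∈ V
      · have hcont : PySem.Set.contains V u = true := (PySem.Set.contains_iff V u).2 hu
        have hred : pvBfsInner d (u :: t) (V, F, Q) = pvBfsInner d t (V, F, Q) := by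
          simp [pvBfsInner, hu]
        rcases ih V F Q hV hF with ⟨c1, c2, c3, c4, c5, c6, c7, c8⟩
        rw [hred]
        refine ⟨c1, c2, ?_, ?_, ?_, c6, ?_, c8⟩
        · intro x; rw [c3 x]; simp only [List.mem_cons]
          constructor
          · rintro (h | h); exact Or.inl h; exact Or.inr (Or.inr h)
          · rintro (h | rfl | h); exact Or.inl h; exact Or.inl hu; exact Or.inr h
        · intro x; rw [c4 x]; simp only [List.mem_cons]
          constructor
          · rintro (h | ⟨h1, h2⟩); exact Or.inl h; exact Or.inr ⟨Or.inr h1, h2⟩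
          · rintro (h | ⟨h1 | h1, h2⟩)
            · exact Or.inl h
            · exact absurd (h1 ▸ hu) h2
            · exact Or.inr ⟨h1, h2⟩
        · intro S hS
          rcases c5 S hS with h | ⟨w, hw1, hw2, hw3⟩
          · exact Or.inl h
          · exact Or.inr ⟨w, List.mem_cons_of_mem _ hw1, hw2, hw3⟩
        · intro w hw hwV
          rcases List.mem_cons.1 hw with rfl | hw'
          · exact absurd hu hwV
          · exact c7 w hw' hwV
      · have hcont : PySem.Set.contains V u = false :=
          Bool.eq_false_iff.2 (fun h => hu ((PySem.Set.contains_iff V u).1 h))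
        have hred : pvBfsInner d (u :: t) (V, F, Q) =
            pvBfsInner d t (PySem.Set.add V u, PySem.Set.add F u, (d.getD u []) :: Q) := by
          simp [pvBfsInner, hu]
        have hVlen : (PySem.Set.add V u).length = V.length + 1 := by
          simp [PySem.Set.add, hu]
        rcases ih (PySem.Set.add V u) (PySem.Set.add F u) ((d.getD u []) :: Q)
            (PySem.Set.nodup_add _ _ hV) (PySem.Set.nodup_add _ _ hF) with
          ⟨c1, c2, c3, c4, c5, c6, c7, c8⟩
        rw [hred]
        refine ⟨c1, c2, ?_, ?_, ?_, ?_, ?_, ?_⟩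
        · intro x; rw [c3 x]; simp only [PySem.Set.mem_add, List.mem_cons]; tauto
        · intro x; rw [c4 x]; simp only [PySem.Set.mem_add, List.mem_cons]
          constructor
          · rintro ((h | rfl) | ⟨h1, h2⟩)
            · exact Or.inl h
            · exact Or.inr ⟨Or.inl rfl, hu⟩
            · exact Or.inr ⟨Or.inr h1, fun hx => h2 (Or.inl hx)⟩
          · rintro (h | ⟨h1 | h1, h2⟩)
            · exact Or.inl (Or.inl h)
            · exact Or.inl (Or.inr h1)
            · by_cases hxu : x = u
              · exact Or.inl (Or.inr hxu)
              · exact Or.inr ⟨h1, fun hx => hx.elim (fun hx => h2 hx) (fun hx => hxu hx)⟩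
        · intro S hS
          rcases c5 S hS with h | ⟨w, hw1, hw2, hw3⟩
          · rcases List.mem_cons.1 h with rfl | h'
            · exact Or.inr ⟨u, List.mem_cons_self, hu, rfl⟩
            · exact Or.inl h'
          · refine Or.inr ⟨w, List.mem_cons_of_mem _ hw1, fun hx => hw2 ((PySem.Set.mem_add V u w).2 (Or.inl hx)), hw3⟩
        · intro S hS; exact c6 S (List.mem_cons_of_mem _ hS)
        · intro w hw hwV
          rcases List.mem_cons.1 hw with rfl | hw'
          · exact c6 _ List.mem_cons_self
          · by_cases hwu : w = u
            · subst hwu; exact c6 _ List.mem_cons_self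
            · exact c7 w hw' (fun hx => ((PySem.Set.mem_add V u w).1 hx).elim (fun hx => hwV hx) (fun hx => hwu hx))
        · rw [hVlen] at c8; simp only [List.length_cons] at c8; omega

-- the BFS while-loop visits exactly the component of the root (on top of the old visited set)
theorem pvBfsLoop_spec (gb : List (Int × Int)) (d : PySem.Dict Int (PySem.Set Int))
    (Hadj : ∀ v u, u ∈ d.getD v [] ↔ v ∈ pvNodes gb ∧ (u = v ∨ pvStep gb v u))
    (HK : ∀ k : Int, k ∈ d.keys ↔ k ∈ pvNodes gb) (HKnd : d.keys.Nodup) :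
    ∀ (fuel : Nat) (V F : PySem.Set Int) (Q : List (List Int)) (V0 : List Int) (r : Int),
    V.Nodup → F.Nodup →
    (∀ x ∈ V0, x ∈ V) →
    (∀ u ∈ V, u ∈ V0 ∨ pvReach gb r u) →
    (∀ u ∈ V, u ∈ pvNodes gb) →
    (∀ S ∈ Q, ∃ w, w ∈ V ∧ w ∉ V0 ∧ S = d.getD w []) →
    (∀ w ∈ V, w ∉ V0 → (d.getD w [] ∈ Q ∨ ∀ u ∈ d.getD w [], u ∈ V)) →
    (∀ u, u ∈ F ↔ u ∈ d.getD r [] ∨ (u ∈ V ∧ u ∉ V0)) →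
    (∀ w ∈ V0, ∀ u, pvStep gb w u → u ∈ V0) →
    r ∈ V → r ∉ V0 →
    Q.length + d.keys.length < fuel + V.length →
    (pvBfsLoop d fuel V F Q).1.Nodup ∧
    (pvBfsLoop d fuel V F Q).2.Nodup ∧
    (∀ u, u ∈ (pvBfsLoop d fuel V F Q).1 ↔ u ∈ V0 ∨ pvReach gb r u) ∧
    (∀ u, u ∈ (pvBfsLoop d fuel V F Q).2 ↔ pvReach gb r u) := by
  intro fuel
  induction fuel with
  | zero =>
      intro V F Q V0 r hVnd hFnd hV0 hVmem hVnodes hQ hClose hF hV0cl hrV hrV0 hfuel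
      exfalso
      have hsub : ∀ x ∈ V, x ∈ d.keys := fun x hx => (HK x).2 (hVnodes x hx)
      have := pvNodup_length_le hVnd HKnd hsub
      omega
  | succ fuel ih =>
      intro V F Q V0 r hVnd hFnd hV0 hVmem hVnodes hQ hClose hF hV0cl hrV hrV0 hfuel
      have hV0reach : ∀ u x, u ∈ V0 → pvReach gb u x → x ∈ V0 := by
        intro u x hu hr
        induction hr with
        | refl => exact hu
        | tail _ hstep ih' => exact hV0cl _ ih' _ hstep
      cases Q with
      | nil =>
          have hred : pvBfsLoop d (fuel + 1) V F [] = (V, F) := rfl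
          rw [hred]
          have hclosedV : ∀ x, pvReach gb r x → x ∈ V := by
            intro x hx
            induction hx with
            | refl => exact hrV
            | @tail p q hrp hpq ihp =>
                by_cases hpV0 : p ∈ V0
                · exact hV0 q (hV0cl p hpV0 q hpq)
                · rcases hClose p ihp hpV0 with hin | hall
                  · exact absurd hin (List.not_mem_nil)
                  · exact hall q ((Hadj p q).2 ⟨hVnodes p ihp, Or.inr hpq⟩)
          refine ⟨hVnd, hFnd, ?_, ?_⟩
          · intro u; exact ⟨hVmem u, fun h => h.elim (hV0 u) (hclosedV u)⟩
          · intro u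
            rw [hF u]
            constructor
            · rintro (h | ⟨h1, h2⟩)
              · rcases (Hadj r u).1 h with ⟨_, (rfl | hstep)⟩
                · exact Relation.ReflTransGen.refl
                · exact Relation.ReflTransGen.single hstep
              · rcases hVmem u h1 with h | h
                · exact absurd h h2
                · exact h
            · intro h
              have huV : u ∈ V := hclosedV u h
              have huV0 : u ∉ V0 := fun h0 => hrV0 (hV0reach u r h0 (pvReach_symm gb h))
              exact Or.inr ⟨huV, huV0⟩
      | cons S Qt =>
          rcases hQ S (by simp) with ⟨w0, hw0V, hw0V0, hS⟩
          have hrw0 : pvReach gb r w0 := by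
            rcases hVmem w0 hw0V with h | h
            · exact absurd h hw0V0
            · exact h
          have hcur : ∀ u ∈ S, u ∈ pvNodes gb ∧ pvReach gb r u := by
            intro u hu
            rw [hS] at hu
            rcases (Hadj w0 u).1 hu with ⟨hw0N, (rfl | hstep)⟩
            · exact ⟨hw0N, hrw0⟩
            · exact ⟨pvStep_mem_right hstep, hrw0.tail hstep⟩
          rcases pvBfsInner_spec d S V F Qt hVnd hFnd with ⟨c1, c2, c3, c4, c5, c6, c7, c8⟩
          have hred : pvBfsLoop d (fuel + 1) V F (S :: Qt) =
              pvBfsLoop d fuel (pvBfsInner d S (V, F, Qt)).1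
                (pvBfsInner d S (V, F, Qt)).2.1 (pvBfsInner d S (V, F, Qt)).2.2 := rfl
          rw [hred]
          apply ih _ _ _ V0 r c1 c2
          · intro x hx; exact (c3 x).2 (Or.inl (hV0 x hx))
          · intro u hu
            rcases (c3 u).1 hu with h | h
            · exact hVmem u h
            · exact Or.inr (hcur u h).2
          · intro u hu
            rcases (c3 u).1 hu with h | h
            · exact hVnodes u h
            · exact (hcur u h).1
          · intro S' hS'
            rcases c5 S' hS' with h | ⟨w, hw1, hw2, hw3⟩
            · rcases hQ S' (List.mem_cons_of_mem _ h) with ⟨w, ha1, ha2, ha3⟩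
              exact ⟨w, (c3 w).2 (Or.inl ha1), ha2, ha3⟩
            · exact ⟨w, (c3 w).2 (Or.inr hw1), fun h0 => hw2 (hV0 w h0), hw3⟩
          · intro w hw hwV0
            by_cases hwV : w ∈ V
            · rcases hClose w hwV hwV0 with hin | hall
              · rcases List.mem_cons.1 hin with heq | hin'
                · right
                  intro u hu
                  rw [heq] at hu
                  exact (c3 u).2 (Or.inr hu)
                · exact Or.inl (c6 _ hin')
              · exact Or.inr (fun u hu => (c3 u).2 (Or.inl (hall u hu)))
            · have hwS : w ∈ S := by
                rcases (c3 w).1 hw with h | h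
                · exact absurd h hwV
                · exact h
              exact Or.inl (c7 w hwS hwV)
          · intro u
            rw [c4 u, hF u]
            constructor
            · rintro ((h | ⟨h1, h2⟩) | ⟨h1, h2⟩)
              · exact Or.inl h
              · exact Or.inr ⟨(c3 u).2 (Or.inl h1), h2⟩
              · exact Or.inr ⟨(c3 u).2 (Or.inr h1), fun h0 => h2 (hV0 u h0)⟩
            · rintro (h | ⟨h1, h2⟩)
              · exact Or.inl (Or.inl h)
              · rcases (c3 u).1 h1 with h | h
                · exact Or.inl (Or.inr ⟨h, h2⟩)
                · by_cases huV : u ∈ V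
                  · exact Or.inl (Or.inr ⟨huV, h2⟩)
                  · exact Or.inr ⟨h, huV⟩
          · exact hV0cl
          · exact (c3 r).2 (Or.inl hrV)
          · exact hrV0
          · simp only [List.length_cons] at hfuel
            omega

-- the outer loop over the dict keys accumulates the component list
theorem pvOuter_spec (gb : List (Int × Int)) (d : PySem.Dict Int (PySem.Set Int))
    (Hadj : ∀ v u, u ∈ d.getD v [] ↔ v ∈ pvNodes gb ∧ (u = v ∨ pvStep gb v u))
    (HadjN : ∀ v, (d.getD v []).Nodup)
    (HK : ∀ k : Int, k ∈ d.keys ↔ k ∈ pvNodes gb) (HKnd : d.keys.Nodup) :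
    ∀ (ks : List Int) (visited : PySem.Set Int) (groups : List (PySem.Set Int)),
    (∀ k ∈ ks, k ∈ pvNodes gb) →
    visited.Nodup →
    (∀ u ∈ visited, u ∈ pvNodes gb) →
    (∀ w ∈ visited, ∀ u, pvStep gb w u → u ∈ visited) →
    (∀ g ∈ groups, g.Nodup ∧ ∃ v, v ∈ pvNodes gb ∧ ∀ u, (u ∈ g ↔ pvReach gb v u)) →
    (∀ u, u ∈ visited ↔ ∃ g ∈ groups, u ∈ g) →
    groups.Pairwise (fun g h => ∀ u, u ∈ g → u ∉ h) →
    (ks.foldl (pvOuterStep d) (visited, groups)).1.Nodup ∧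
    (∀ u ∈ (ks.foldl (pvOuterStep d) (visited, groups)).1, u ∈ pvNodes gb) ∧
    (∀ w ∈ (ks.foldl (pvOuterStep d) (visited, groups)).1, ∀ u, pvStep gb w u →
        u ∈ (ks.foldl (pvOuterStep d) (visited, groups)).1) ∧
    (∀ g ∈ (ks.foldl (pvOuterStep d) (visited, groups)).2,
        g.Nodup ∧ ∃ v, v ∈ pvNodes gb ∧ ∀ u, (u ∈ g ↔ pvReach gb v u)) ∧
    (∀ u, u ∈ (ks.foldl (pvOuterStep d) (visited, groups)).1 ↔
        ∃ g ∈ (ks.foldl (pvOuterStep d) (visited, groups)).2, u ∈ g) ∧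
    (ks.foldl (pvOuterStep d) (visited, groups)).2.Pairwise (fun g h => ∀ u, u ∈ g → u ∉ h) ∧
    (∀ u ∈ visited, u ∈ (ks.foldl (pvOuterStep d) (visited, groups)).1) ∧
    (∀ k ∈ ks, k ∈ (ks.foldl (pvOuterStep d) (visited, groups)).1) := by
  intro ks
  induction ks with
  | nil =>
      intro visited groups _ hnd hnodes hclosed hgroups hcov hpair
      exact ⟨hnd, hnodes, hclosed, hgroups, hcov, hpair, fun u hu => hu, by simp⟩
  | cons k kt ih =>
      intro visited groups hks hnd hnodes hclosed hgroups hcov hpair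
      have hkN : k ∈ pvNodes gb := hks k (by simp)
      by_cases hk : k ∈ visited
      · have hred : (k :: kt).foldl (pvOuterStep d) (visited, groups) =
            kt.foldl (pvOuterStep d) (visited, groups) := by
          rw [List.foldl_cons]
          congr 1
          simp [pvOuterStep, hk]
        rcases ih visited groups (fun k' h => hks k' (by simp [h])) hnd hnodes hclosed hgroups
            hcov hpair with ⟨o1, o2, o3, o4, o5, o6, o7, o8⟩
        rw [hred]
        refine ⟨o1, o2, o3, o4, o5, o6, o7, ?_⟩
        intro k' hk'
        rcases List.mem_cons.1 hk' with rfl | h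
        · exact o7 k' hk
        · exact o8 k' h
      · -- the reach-closure of visited
        have hreachcl : ∀ u x, u ∈ visited → pvReach gb u x → x ∈ visited := by
          intro u x hu hr
          induction hr with
          | refl => exact hu
          | tail _ hstep ih' => exact hclosed _ ih' _ hstep
        have hkadj : k ∈ d.getD k [] := (Hadj k k).2 ⟨hkN, Or.inl rfl⟩
        rcases pvBfsLoop_spec gb d Hadj HK HKnd (d.keys.length + 1)
            (PySem.Set.add visited k) (d.getD k []) [d.getD k []] visited k
            (PySem.Set.nodup_add _ _ hnd) (HadjN k)
            (fun x hx => (PySem.Set.mem_add _ _ _).2 (Or.inl hx))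
            (fun u hu => by
              rcases (PySem.Set.mem_add _ _ _).1 hu with h | rfl
              · exact Or.inl h
              · exact Or.inr Relation.ReflTransGen.refl)
            (fun u hu => by
              rcases (PySem.Set.mem_add _ _ _).1 hu with h | rfl
              · exact hnodes u h
              · exact hkN)
            (fun S hSm => by
              have hSe : S = d.getD k [] := by simpa using hSm
              exact ⟨k, (PySem.Set.mem_add _ _ _).2 (Or.inr rfl), hk, hSe⟩)
            (fun w hw hwV0 => by
              rcases (PySem.Set.mem_add _ _ _).1 hw with h | rfl
              · exact absurd h hwV0
              · exact Or.inl (by simp))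
            (fun u => by
              constructor
              · intro h; exact Or.inl h
              · rintro (h | ⟨h1, h2⟩)
                · exact h
                · rcases (PySem.Set.mem_add _ _ _).1 h1 with h | rfl
                  · exact absurd h h2
                  · exact hkadj)
            hclosed
            ((PySem.Set.mem_add _ _ _).2 (Or.inr rfl))
            hk
            (by
              have hpos : 0 < (PySem.Set.add visited k).length :=
                List.length_pos_of_mem ((PySem.Set.mem_add _ _ _).2 (Or.inr rfl))
              simp only [List.length_cons, List.length_nil]
              omega)
          with ⟨b1, b2, b3, b4⟩
        have hred : (k :: kt).foldl (pvOuterStep d) (visited, groups) =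
            kt.foldl (pvOuterStep d)
              ((pvBfsLoop d (d.keys.length + 1) (PySem.Set.add visited k)
                  (d.getD k []) [d.getD k []]).1,
               groups ++ [(pvBfsLoop d (d.keys.length + 1) (PySem.Set.add visited k)
                  (d.getD k []) [d.getD k []]).2]) := by
          rw [List.foldl_cons]
          congr 1
          simp [pvOuterStep, hk]
        rw [hred]
        rcases ih ((pvBfsLoop d (d.keys.length + 1) (PySem.Set.add visited k)
                (d.getD k []) [d.getD k []]).1)
            (groups ++ [(pvBfsLoop d (d.keys.length + 1) (PySem.Set.add visited k)
                (d.getD k []) [d.getD k []]).2])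
            (fun k' h => hks k' (by simp [h]))
            b1
            (fun u hu => by
              rcases (b3 u).1 hu with h | h
              · exact hnodes u h
              · rcases pvReach_mem_right h with rfl | h'
                · exact hkN
                · exact h')
            (fun w hw u hstep => by
              rcases (b3 w).1 hw with h | h
              · exact (b3 u).2 (Or.inl (hclosed w h u hstep))
              · exact (b3 u).2 (Or.inr (h.tail hstep)))
            (fun g hgm => by
              rcases List.mem_append.1 hgm with h | h
              · exact hgroups g h
              · have : g = (pvBfsLoop d (d.keys.length + 1) (PySem.Set.add visited k)
                    (d.getD k []) [d.getD k []]).2 := by simpa using h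
                subst this
                exact ⟨b2, k, hkN, b4⟩)
            (fun u => by
              constructor
              · intro hu
                rcases (b3 u).1 hu with h | h
                · rcases (hcov u).1 h with ⟨g, hgm, hug⟩
                  exact ⟨g, List.mem_append.2 (Or.inl hgm), hug⟩
                · exact ⟨_, List.mem_append.2 (Or.inr (by simp)), (b4 u).2 h⟩
              · rintro ⟨g, hgm, hug⟩
                rcases List.mem_append.1 hgm with h | h
                · exact (b3 u).2 (Or.inl ((hcov u).2 ⟨g, h, hug⟩))
                · have : g = (pvBfsLoop d (d.keys.length + 1) (PySem.Set.add visited k)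
                      (d.getD k []) [d.getD k []]).2 := by simpa using h
                  subst this
                  exact (b3 u).2 (Or.inr ((b4 u).1 hug)))
            (by
              rw [List.pairwise_append]
              refine ⟨hpair, by simp, ?_⟩
              intro g hgm F' hF' u hug huF'
              have : F' = (pvBfsLoop d (d.keys.length + 1) (PySem.Set.add visited k)
                  (d.getD k []) [d.getD k []]).2 := by simpa using hF'
              subst this
              have huvis : u ∈ visited := (hcov u).2 ⟨g, hgm, hug⟩
              have hku : pvReach gb k u := (b4 u).1 huF'
              exact hk (hreachcl u k huvis (pvReach_symm gb hku)))
          with ⟨o1, o2, o3, o4, o5, o6, o7, o8⟩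
        refine ⟨o1, o2, o3, o4, o5, o6, ?_, ?_⟩
        · intro u hu
          exact o7 u ((b3 u).2 (Or.inl hu))
        · intro k' hk'
          rcases List.mem_cons.1 hk' with rfl | h
          · exact o7 k' ((b3 k').2 (Or.inr Relation.ReflTransGen.refl))
          · exact o8 k' h

theorem pvA_comps_spec (gb : List (Int × Int)) : pvIsComps gb (pvGroups gb) := by
  have hedges : ∀ e ∈ gb, e.1 ∈ pvNodes gb ∧ e.2 ∈ pvNodes gb := by
    intro e he
    exact ⟨List.mem_flatMap.2 ⟨e, he, by simp⟩, List.mem_flatMap.2 ⟨e, he, by simp⟩⟩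
  have hinit : ∀ v u, u ∈ (pvAdjInit gb).getD v [] ↔
      v ∈ pvNodes gb ∧ (u = v ∨ pvStep [] v u) := by
    intro v u
    rw [pvAdjInit_getD]
    by_cases hv : v ∈ pvNodes gb
    · rw [if_pos hv]; simp [pvStep, hv]
    · rw [if_neg hv]; simp [hv]
  have hinitnd : ∀ v, ((pvAdjInit gb).getD v []).Nodup := by
    intro v
    rw [pvAdjInit_getD]
    split_ifs <;> simp
  rcases pvAdjFill_getD gb gb [] (pvAdjInit gb) hedges hinit hinitnd with ⟨Hadj0, HadjN⟩
  have Hadj : ∀ v u, u ∈ ((pvAdjFill gb (pvAdjInit gb)).getD v []) ↔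
      v ∈ pvNodes gb ∧ (u = v ∨ pvStep gb v u) := by
    intro v u
    rw [Hadj0 v u]
    rw [List.nil_append]
  have HK : ∀ k : Int, k ∈ (pvAdjFill gb (pvAdjInit gb)).keys ↔ k ∈ pvNodes gb := by
    intro k
    rw [pvAdjFill_keys_mem, pvAdjInit_keys_mem]
    tauto
  have HKnd : (pvAdjFill gb (pvAdjInit gb)).keys.Nodup :=
    pvAdjFill_keys_nodup _ _ (pvAdjInit_keys_nodup gb)
  rcases pvOuter_spec gb (pvAdjFill gb (pvAdjInit gb)) Hadj HadjN HK HKnd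
      (pvAdjFill gb (pvAdjInit gb)).keys PySem.Set.empty []
      (fun k h => (HK k).1 h)
      (by simp [PySem.Set.empty])
      (by simp [PySem.Set.empty])
      (by simp [PySem.Set.empty])
      (by simp)
      (by simp [PySem.Set.empty])
      (by simp)
      with ⟨o1, o2, o3, o4, o5, o6, o7, o8⟩
  have hGdef : pvGroups gb =
      ((pvAdjFill gb (pvAdjInit gb)).keys.foldl (pvOuterStep (pvAdjFill gb (pvAdjInit gb)))
        (PySem.Set.empty, [])).2 := rfl
  rw [hGdef]
  refine ⟨o4, ?_, o6⟩
  intro v hv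
  exact (o5 v).1 (o8 v ((HK v).2 hv))

-- ——— extraction ———

theorem pvScanMin_spec :
    ∀ (l : List (PySem.Set Int)),
    l.Pairwise (fun g h => PySem.Set.len g ≤ PySem.Set.len h) →
    (∃ g ∈ l, PySem.Set.len g ≠ 1) →
    ∃ m, pvScanMin l = some m ∧ (∃ g ∈ l, PySem.Set.len g = m) ∧ m ≠ 1 ∧
        (∀ g ∈ l, PySem.Set.len g ≠ 1 → m ≤ PySem.Set.len g) := by
  intro l
  induction l with
  | nil => intro _ h; simp at h
  | cons g t ih =>
      intro hp hex
      rcases List.pairwise_cons.1 hp with ⟨hg, ht⟩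
      by_cases hlen : PySem.Set.len g = 1
      · have hex' : ∃ g' ∈ t, PySem.Set.len g' ≠ 1 := by
          rcases hex with ⟨g0, hg0, hne⟩
          rcases List.mem_cons.1 hg0 with rfl | h
          · exact absurd hlen hne
          · exact ⟨g0, h, hne⟩
        rcases ih ht hex' with ⟨m, hscan, ⟨g', hg', hlg'⟩, hm1, hbound⟩
        refine ⟨m, ?_, ⟨g', List.mem_cons_of_mem _ hg', hlg'⟩, hm1, ?_⟩
        · simp only [pvScanMin]; rw [if_pos hlen]; exact hscan
        · intro g0 hg0 hne
          rcases List.mem_cons.1 hg0 with rfl | h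
          · exact absurd hlen hne
          · exact hbound g0 h hne
      · refine ⟨PySem.Set.len g, by simp only [pvScanMin]; rw [if_neg hlen], ⟨g, by simp, rfl⟩, hlen, ?_⟩
        intro g0 hg0 _
        rcases List.mem_cons.1 hg0 with rfl | h
        · exact le_refl _
        · exact hg g0 h

theorem pvLast_spec :
    ∀ (l : List (PySem.Set Int)),
    l ≠ [] →
    l.Pairwise (fun g h => PySem.Set.len g ≤ PySem.Set.len h) →
    ∃ M, l.getLast? = some M ∧ M ∈ l ∧ ∀ g ∈ l, PySem.Set.len g ≤ PySem.Set.len M := by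
  intro l
  induction l with
  | nil => intro h; exact absurd rfl h
  | cons g t ih =>
      intro _ hp
      rcases List.pairwise_cons.1 hp with ⟨hg, ht⟩
      cases t with
      | nil => exact ⟨g, rfl, by simp, by intro g0 hg0; simp at hg0; simp [hg0]⟩
      | cons h' t' =>
          rcases ih (by simp) ht with ⟨M, hlast, hMmem, hbound⟩
          refine ⟨M, ?_, List.mem_cons_of_mem _ hMmem, ?_⟩
          · rw [List.getLast?_cons_cons]; exact hlast
          · intro g0 hg0
            rcases List.mem_cons.1 hg0 with rfl | hmem
            · exact hg M hMmem
            · exact hbound g0 hmem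

-- ===== VERDICT (by name: the statement is the Claim_ definition above) =====
theorem componentsInGraph_spec : Claim_equal_componentsInGraph := by
  intro gb _hD hPre
  unfold Pre_componentsInGraph at hPre
  obtain ⟨hne, e0, he0, hne0⟩ := hPre
  obtain ⟨hgA, hcovA, _⟩ := pvA_comps_spec gb
  have hperm := pvIsComps_len_perm (pvA_comps_spec gb) (pvB_comps_spec gb)
  set groups := pvGroups gb with hgroups
  set comps := gb.foldl pvMergeEdge [] with hcomps
  have hlenmap : ∀ l : List (List Int),
      l.map PySem.Set.len = (l.map List.length).map (fun n : Nat => (n : Int)) := by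
    intro l; rw [List.map_map]; apply List.map_congr_left; intro g _
    simp [PySem.Set.len]
  have hLperm : (groups.map PySem.Set.len).Perm (comps.map PySem.Set.len) := by
    rw [hlenmap, hlenmap]; exact hperm.map _
  set gs := PySem.List.sorted groups (fun g => PySem.Set.len g) false with hgs
  have hgsperm : gs.Perm groups := PySem.List.sorted_perm groups _ false
  have hpw : gs.Pairwise (fun g h => PySem.Set.len g ≤ PySem.Set.len h) :=
    PySem.List.sorted_pairwise groups _
  have he1N : e0.1 ∈ pvNodes gb := List.mem_flatMap.2 ⟨e0, he0, by simp⟩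
  obtain ⟨g2, hg2mem, hg2e1⟩ := hcovA e0.1 he1N
  obtain ⟨hg2nd, v2, _, hiff2⟩ := hgA g2 hg2mem
  have hg2e2 : e0.2 ∈ g2 := (hiff2 e0.2).2 (((hiff2 e0.1).1 hg2e1).tail (Or.inl he0))
  have h2le : 2 ≤ g2.length := by
    have hsub : ({e0.1, e0.2} : Finset Int) ⊆ g2.toFinset := by
      intro x hx
      rcases Finset.mem_insert.1 hx with rfl | hx
      · exact List.mem_toFinset.2 hg2e1
      · rw [Finset.mem_singleton] at hx; subst hx; exact List.mem_toFinset.2 hg2e2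
    have hcard := Finset.card_le_card hsub
    rw [Finset.card_pair hne0, List.toFinset_card_of_nodup hg2nd] at hcard
    exact hcard
  have hge1 : ∀ g ∈ groups, 1 ≤ g.length := by
    intro g hg
    obtain ⟨_, v, _, hiff⟩ := hgA g hg
    exact List.length_pos_of_mem ((hiff v).2 Relation.ReflTransGen.refl)
  have hlen2 : (1 : Int) < PySem.Set.len g2 := by
    simp only [PySem.Set.len]
    omega
  have hg2gs : g2 ∈ gs := hgsperm.mem_iff.2 hg2mem
  obtain ⟨m, hscan, ⟨gm, hgm, hgmlen⟩, hm1, hmbound⟩ :=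
    pvScanMin_spec gs hpw ⟨g2, hg2gs, by omega⟩
  have hgmg : gm ∈ groups := hgsperm.mem_iff.1 hgm
  have hmgt : (1 : Int) < m := by
    have h1 := hge1 gm hgmg
    have hcast : PySem.Set.len gm = (gm.length : Int) := by
      simp only [PySem.Set.len]
    rw [hcast] at hgmlen
    omega
  set sizes := comps.map PySem.Set.len with hsizes
  have hmem_sizes : ∀ x : Int, x ∈ sizes ↔ x ∈ groups.map PySem.Set.len :=
    fun x => (hLperm.mem_iff).symm
  have hm_groups : m ∈ groups.map PySem.Set.len := List.mem_map.2 ⟨gm, hgmg, hgmlen⟩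
  have hm_filter : m ∈ sizes.filter (fun s => decide (1 < s)) :=
    List.mem_filter.2 ⟨(hmem_sizes m).2 hm_groups, by simp [hmgt]⟩
  obtain ⟨m', hmin⟩ : ∃ m', PySem.List.min?
      (sizes.filter (fun s => decide (1 < s))) (fun s => s) = some m' := by
    cases hc : PySem.List.min? (sizes.filter (fun s => decide (1 < s))) (fun s => s) with
    | none =>
        rw [PySem.List.min?_eq_none_iff] at hc
        rw [hc] at hm_filter
        simp at hm_filter
    | some x => exact ⟨x, rfl⟩
  have hm'f := PySem.List.min?_mem hmin
  have hm'sz : m' ∈ sizes := (List.mem_filter.1 hm'f).1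
  have hm'gt : (1 : Int) < m' := by
    have := (List.mem_filter.1 hm'f).2
    simpa using this
  have hm'le : m' ≤ m := PySem.List.min?_isMin hmin m hm_filter
  have hlem' : m ≤ m' := by
    rcases List.mem_map.1 ((hmem_sizes m').1 hm'sz) with ⟨g, hg, hlg⟩
    have := hmbound g (hgsperm.mem_iff.2 hg) (by omega)
    omega
  have hmm' : m = m' := le_antisymm hlem' hm'le
  have hgs_ne : gs ≠ [] := by
    intro h; rw [h] at hg2gs; simp at hg2gs
  obtain ⟨M, hlast, hMgs, hMbound⟩ := pvLast_spec gs hgs_ne hpw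
  have hsz_ne : sizes ≠ [] := by
    intro h; rw [h] at hm'sz; simp at hm'sz
  obtain ⟨Mx, hmax⟩ : ∃ Mx, PySem.List.max? sizes (fun s => s) = some Mx := by
    cases hc : PySem.List.max? sizes (fun s => s) with
    | none => rw [PySem.List.max?_eq_none_iff] at hc; exact absurd hc hsz_ne
    | some x => exact ⟨x, rfl⟩
  have hMx_sz := PySem.List.max?_mem hmax
  have hMx_le : Mx ≤ PySem.Set.len M := by
    rcases List.mem_map.1 ((hmem_sizes Mx).1 hMx_sz) with ⟨g, hg, hlg⟩
    have := hMbound g (hgsperm.mem_iff.2 hg)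
    omega
  have hM_sz : PySem.Set.len M ∈ sizes :=
    (hmem_sizes _).2 (List.mem_map.2 ⟨M, hgsperm.mem_iff.1 hMgs, rfl⟩)
  have hle_Mx : PySem.Set.len M ≤ Mx := PySem.List.max?_isMax hmax _ hM_sz
  have hMM : PySem.Set.len M = Mx := le_antisymm hle_Mx hMx_le
  show ((pvScanMin gs).getD 0, ((gs.getLast?).map PySem.Set.len).getD 0) =
      ((PySem.List.min? (sizes.filter (fun s => decide (1 < s))) (fun s => s)).getD 0,
       (PySem.List.max? sizes (fun s => s)).getD 0)
  rw [hscan, hlast, hmin, hmax]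
  simp only [Option.getD_some, Option.map_some]
  rw [hmm', hMM]
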